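-- pv_equiv track=rewrite | github.com/SoltanovM/daily-leetcode-practice | miscellaneous/suggested-question-20260221.py | get_disjoint_swap_sets
-- ===== SOURCE A (Python) =====
-- def get_disjoint_swap_sets(allowedSwaps: list[list[int]]) -> list[list[int]]:
--     """
--     Build connected components of swappable indices with union-find.
--     Each returned list contains indices whose values can be permuted freely.
--     For more infos: https://cp-algorithms.com/data_structures/disjoint_set_union.html
--     """
--     if not allowedSwaps:
--         return []
--
--     parent = {}
--     size = {}
--
--     def find(node: int) -> int:
--         """Return the component representative for node with path compression."""
--         while parent[node] != node:
--             parent[node] = parent[parent[node]]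
--             node = parent[node]
--         return node
--
--     def union(a: int, b: int) -> None:
--         """Merge the components for a and b using union by size."""
--         root_a = find(a)
--         root_b = find(b)
--         if root_a == root_b:
--             return
--         if size[root_a] < size[root_b]:
--             root_a, root_b = root_b, root_a
--         parent[root_b] = root_a
--         size[root_a] += size[root_b]
--
--     for a, b in allowedSwaps:
--         if a not in parent:
--             parent[a] = a
--             size[a] = 1
--         if b not in parent:
--             parent[b] = b
--             size[b] = 1
--         union(a, b)
--
--     components = {}
--     for node in parent:
--         root = find(node)
--         components.setdefault(root, []).append(node)
--
--     return list(components.values())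
-- ===== SOURCE B (Python) =====
-- def get_disjoint_swap_sets(allowedSwaps: list[list[int]]) -> list[list[int]]:
--     """Group swappable indices by label propagation: give every index a
--     component label, merging labels by wholesale relabelling, then collect
--     indices by label in first-seen order."""
--     if not allowedSwaps:
--         return []
--
--     label = {}
--     next_label = 0
--     for a, b in allowedSwaps:
--         la = label.get(a)
--         lb = label.get(b)
--         if la is None and lb is None:
--             label[a] = next_label
--             label[b] = next_label
--             next_label += 1
--         elif lb is None:
--             label[b] = la
--         elif la is None:
--             label[a] = lb
--         elif la != lb:
--             for n, l in label.items():
--                 if l == lb: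
--                     label[n] = la
--
--     groups = {}
--     for n, l in label.items():
--         groups.setdefault(l, []).append(n)
--     return list(groups.values())
-- ===== Notes on version B (the rewrite author's own statement) =====
-- stated objective: alternative
-- what changed: Replaces the union-find forest (parent/size dicts, find with path compression, union by size) with a flat node-to-label map merged by wholesale relabelling of one class, then groups nodes by label in first-seen order.
import Mathlib
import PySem

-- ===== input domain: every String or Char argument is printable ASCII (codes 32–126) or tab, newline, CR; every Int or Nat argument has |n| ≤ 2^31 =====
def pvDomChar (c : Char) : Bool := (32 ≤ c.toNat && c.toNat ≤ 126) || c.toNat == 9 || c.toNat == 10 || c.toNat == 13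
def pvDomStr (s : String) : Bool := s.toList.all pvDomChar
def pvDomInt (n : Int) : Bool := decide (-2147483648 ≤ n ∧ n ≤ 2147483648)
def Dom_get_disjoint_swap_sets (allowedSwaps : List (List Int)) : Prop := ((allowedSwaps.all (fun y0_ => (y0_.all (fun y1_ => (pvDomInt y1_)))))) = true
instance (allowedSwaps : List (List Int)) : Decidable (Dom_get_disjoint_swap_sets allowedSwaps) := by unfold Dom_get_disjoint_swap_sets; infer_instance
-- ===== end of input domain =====

-- B replaces A's union-find (parent forest, path compression, union by size) with a flat
-- node→label map merged by wholesale relabelling; same grouping of nodes, same order.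

-- ===== PORT A =====
-- find(node): while parent[node] != node: parent[node] = parent[parent[node]]; node = parent[node]
-- (fuel = number of keys + 1 only makes the loop total; it never runs out on the forests A builds)
def pvFind (fuel : Nat) (parent : PySem.Dict Int Int) (node : Int) :
    PySem.Dict Int Int × Int :=
  match fuel with
  | 0 => (parent, node)
  | f + 1 =>
    let p := parent.getD node node
    if p = node then (parent, node)
    else pvFind f (parent.insert node (parent.getD p p)) (parent.getD p p)

-- union(a, b) with union by size
def pvUnion (parent size : PySem.Dict Int Int) (a b : Int) :
    PySem.Dict Int Int × PySem.Dict Int Int :=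
  let fa := pvFind (parent.size + 1) parent a
  let fb := pvFind (fa.1.size + 1) fa.1 b
  if fa.2 = fb.2 then (fb.1, size)
  else
    let pr := if size.getD fa.2 0 < size.getD fb.2 0 then (fb.2, fa.2) else (fa.2, fb.2)
    (fb.1.insert pr.2 pr.1, size.insert pr.1 (size.getD pr.1 0 + size.getD pr.2 0))

-- the body of "for a, b in allowedSwaps" (a non-pair row raises in Python: outside Pre_)
def pvStep (st : PySem.Dict Int Int × PySem.Dict Int Int) (e : List Int) :
    PySem.Dict Int Int × PySem.Dict Int Int :=
  match e with
  | [a, b] =>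
    let st1 := if st.1.contains a then st else (st.1.insert a a, st.2.insert a 1)
    let st2 := if st1.1.contains b then st1 else (st1.1.insert b b, st1.2.insert b 1)
    pvUnion st2.1 st2.2 a b
  | _ => st

def get_disjoint_swap_sets (allowedSwaps : List (List Int)) : List (List Int) :=
  if allowedSwaps = [] then []
  else
    let st := allowedSwaps.foldl pvStep (PySem.Dict.empty, PySem.Dict.empty)
    -- for node in parent: root = find(node); components.setdefault(root, []).append(node)
    let fin := st.1.keys.foldl
      (fun (q : PySem.Dict Int Int × PySem.Dict Int (List Int)) node =>
        let fr := pvFind (q.1.size + 1) q.1 node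
        (fr.1, q.2.insert fr.2 (q.2.getD fr.2 [] ++ [node])))
      (st.1, PySem.Dict.empty)
    fin.2.values

-- ===== PORT B =====
def pvRelabelStep (st : PySem.Dict Int Int × Int) (e : List Int) :
    PySem.Dict Int Int × Int :=
  match e with
  | [a, b] =>
    match st.1.get? a, st.1.get? b with
    | none, none => (((st.1.insert a st.2).insert b st.2), st.2 + 1)
    | some la, none => (st.1.insert b la, st.2)
    | none, some lb => (st.1.insert a lb, st.2)
    | some la, some lb =>
      if la = lb then st
      else (PySem.Dict.mk (st.1.items.map (fun p => if p.2 = lb then (p.1, la) else p)), st.2)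
  | _ => st

def get_disjoint_swap_sets_alt (allowedSwaps : List (List Int)) : List (List Int) :=
  if allowedSwaps = [] then []
  else
    let label := (allowedSwaps.foldl pvRelabelStep (PySem.Dict.empty, 0)).1
    let groups := label.items.foldl
      (fun (g : PySem.Dict Int (List Int)) p => g.insert p.2 (g.getD p.2 [] ++ [p.1]))
      PySem.Dict.empty
    groups.values

-- ===== PRECONDITION & SPEC =====
-- Pre_ excludes rows that are not 2-element lists: Python's "for a, b in allowedSwaps" raises
-- ValueError there (in A and in B alike).
def Pre_get_disjoint_swap_sets (allowedSwaps : List (List Int)) : Prop :=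
  ∀ p ∈ allowedSwaps, p.length = 2
instance (allowedSwaps : List (List Int)) : Decidable (Pre_get_disjoint_swap_sets allowedSwaps) := by
  unfold Pre_get_disjoint_swap_sets; infer_instance

def pvWitness_get_disjoint_swap_sets : List (List Int) := [[0, 1], [2, 3], [1, 2]]

def Spec_get_disjoint_swap_sets (allowedSwaps : List (List Int)) (out : List (List Int)) : Prop := out = get_disjoint_swap_sets_alt allowedSwaps
instance (allowedSwaps : List (List Int)) (out : List (List Int)) : Decidable (Spec_get_disjoint_swap_sets allowedSwaps out) := by unfold Spec_get_disjoint_swap_sets; infer_instance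

-- ===== CLAIM (what is proved, stated in full; the proofs are below) =====
def Claim_equal_get_disjoint_swap_sets : Prop := ∀ (allowedSwaps : List (List Int)), Dom_get_disjoint_swap_sets allowedSwaps → Pre_get_disjoint_swap_sets allowedSwaps → Spec_get_disjoint_swap_sets allowedSwaps (get_disjoint_swap_sets allowedSwaps)


-- ===== LEMMAS AND PROOFS =====

-- ---- forest machinery for A's parent dict ----

/-- `RootedN p n x r`: from `x`, following `parent` pointers reaches the root `r` in `n` steps. -/
inductive RootedN (p : PySem.Dict Int Int) : Nat → Int → Int → Prop
  | self (x : Int) (h : p.getD x x = x) : RootedN p 0 x x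
  | step (n : Nat) (x r : Int) (h : p.getD x x ≠ x)
      (h2 : RootedN p n (p.getD x x) r) : RootedN p (n + 1) x r

def Rooted (p : PySem.Dict Int Int) (x r : Int) : Prop := ∃ n, RootedN p n x r

/-- chains are deterministic: both the length and the root are unique. -/
theorem rootedN_unique {p : PySem.Dict Int Int} {n m : Nat} {x r s : Int}
    (h1 : RootedN p n x r) (h2 : RootedN p m x s) : n = m ∧ r = s := by
  induction h1 generalizing m s with
  | self x h =>
    cases h2 with
    | self => exact ⟨rfl, rfl⟩
    | step m _ _ h' => exact absurd h h'
  | step n x r h hc ih =>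
    cases h2 with
    | self _ h' => exact absurd h' h
    | step m _ s h' hc' =>
      obtain ⟨e1, e2⟩ := ih hc'
      exact ⟨by omega, e2⟩

theorem rooted_unique {p : PySem.Dict Int Int} {x r s : Int}
    (h1 : Rooted p x r) (h2 : Rooted p x s) : r = s := by
  obtain ⟨n, h1⟩ := h1; obtain ⟨m, h2⟩ := h2
  exact (rootedN_unique h1 h2).2

theorem notKey_getD {p : PySem.Dict Int Int} {x : Int} (h : p.getD x x ≠ x) :
    x ∈ p.keys := by
  by_contra hx
  have hc : p.contains x = false := by
    cases hcv : p.contains x with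
    | false => rfl
    | true => exact absurd ((PySem.Dict.contains_iff_mem_keys p x).mp hcv) hx
  exact h (PySem.Dict.getD_of_not_contains p x hc)

/-- the root of a chain starting at a key stays among the keys (needs value-closure). -/
theorem rooted_mem {p : PySem.Dict Int Int}
    (hcl : ∀ z ∈ p.keys, p.getD z z ∈ p.keys) {n : Nat} {x r : Int}
    (hx : x ∈ p.keys) (h : RootedN p n x r) : r ∈ p.keys := by
  induction h with
  | self _ _ => exact hx
  | step n y r h hc ih => exact ih (hcl y hx)

/-- explicit chain: the `n` non-root nodes passed through, with their residual chains. -/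
theorem rootedN_chain {p : PySem.Dict Int Int} {n : Nat} {x r : Int}
    (h : RootedN p n x r) :
    ∃ l : List Int, l.length = n ∧ (∀ z ∈ l, z ∈ p.keys) ∧
      ∀ i (hi : i < l.length), RootedN p (n - i) l[i] r := by
  induction h with
  | self x h => exact ⟨[], rfl, by simp, by simp⟩
  | step n x r h hc ih =>
    obtain ⟨l, hl, hm, hi⟩ := ih
    refine ⟨x :: l, by simp [hl], ?_, ?_⟩
    · intro z hz
      rcases List.mem_cons.mp hz with rfl | hz
      · exact notKey_getD h
      · exact hm z hz
    · intro i hilen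
      match i with
      | 0 => simpa using RootedN.step n x r h hc
      | j + 1 =>
        have hj : j < l.length := by simpa using hilen
        have := hi j hj
        simpa using this

theorem rootedN_le {p : PySem.Dict Int Int} {n : Nat} {x r : Int}
    (h : RootedN p n x r) : n ≤ p.keys.length := by
  obtain ⟨l, hl, hm, hi⟩ := rootedN_chain h
  have hnodup : l.Nodup := by
    rw [List.nodup_iff_injective_getElem]
    intro ⟨i, hi'⟩ ⟨j, hj'⟩ hEq
    simp only at hEq
    have h1 := hi i hi'
    have h2 := hi j hj'
    rw [hEq] at h1
    have := (rootedN_unique h1 h2).1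
    have : i = j := by omega
    simpa using this
  calc n = l.length := hl.symm
    _ = l.toFinset.card := (List.toFinset_card_of_nodup hnodup).symm
    _ ≤ p.keys.toFinset.card := Finset.card_le_card (fun z hz => List.mem_toFinset.mpr (hm z (List.mem_toFinset.mp hz)))
    _ ≤ p.keys.length := List.toFinset_card_le _

/-- two parent dicts with the same `getD x x` everywhere have the same chains. -/
theorem rootedN_ext {p q : PySem.Dict Int Int} (h : ∀ z, q.getD z z = p.getD z z)
    {n : Nat} {x r : Int} (hr : RootedN p n x r) : RootedN q n x r := by
  induction hr with
  | self x hx => exact RootedN.self x (by rw [h]; exact hx)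
  | step n x r hx hc ih =>
    have := RootedN.step (p := q) n x r (by rw [h]; exact hx) (by rw [h]; exact ih)
    exact this

/-- path compression: rewiring a non-root `x` to its grandparent keeps every chain's root
    and never lengthens a chain. -/
theorem compress_transfer {p : PySem.Dict Int Int} {x : Int} (hx : p.getD x x ≠ x) :
    ∀ m y s, RootedN p m y s →
      ∃ m' ≤ m, RootedN (p.insert x (p.getD (p.getD x x) (p.getD x x))) m' y s := by
  intro m
  induction m using Nat.strong_induction_on with
  | _ m ih =>
  intro y s h
  have hget : ∀ z, (p.insert x (p.getD (p.getD x x) (p.getD x x))).getD z z =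
      if z = x then p.getD (p.getD x x) (p.getD x x) else p.getD z z := by
    intro z; rw [PySem.Dict.getD_insert]
  cases h with
  | self y hy =>
    have hyx : y ≠ x := fun he => hx (he ▸ hy)
    exact ⟨0, le_refl _, RootedN.self y (by rw [hget, if_neg hyx]; exact hy)⟩
  | step k y s hy hc =>
    by_cases hyx : y = x
    · subst hyx
      -- hc : RootedN p k (p.getD y y) s
      cases hc with
      | self _ hroot =>
        -- k = 0, s = p.getD y y, grandparent = p.getD y y
        rw [hroot]
        refine ⟨1, by omega, ?_⟩
        refine RootedN.step 0 y (p.getD y y) ?_ ?_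
        · rw [PySem.Dict.getD_insert, if_pos rfl]; exact hy
        · rw [PySem.Dict.getD_insert, if_pos rfl]
          refine RootedN.self (p.getD y y) ?_
          rw [PySem.Dict.getD_insert, if_neg (fun he : p.getD y y = y => hy he)]
          exact hroot
      | step j _ _ hne2 hc2 =>
        -- hc2 : RootedN p j (p.getD (p.getD y y) (p.getD y y)) s,  k = j + 1
        have hgx : p.getD (p.getD y y) (p.getD y y) ≠ y := by
          intro he
          have h1 : RootedN p j y s := he ▸ hc2
          have h2 : RootedN p (j + 1 + 1) y s :=
            RootedN.step (j + 1) y s hy (RootedN.step j (p.getD y y) s hne2 hc2)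
          have := (rootedN_unique h1 h2).1
          omega
        obtain ⟨m'', hle, h''⟩ := ih j (by omega) _ s hc2
        refine ⟨m'' + 1, by omega, ?_⟩
        refine RootedN.step m'' y s ?_ ?_
        · rw [hget, if_pos rfl]; exact hgx
        · rw [hget, if_pos rfl]; exact h''
    · obtain ⟨m'', hle, h''⟩ := ih k (by omega) _ s hc
      refine ⟨m'' + 1, by omega, ?_⟩
      refine RootedN.step m'' y s ?_ ?_
      · rw [hget, if_neg hyx]; exact hy
      · rw [hget, if_neg hyx]; exact h''

/-- linking root `rb` under root `ra`: roots `rb` become `ra`, all other roots unchanged. -/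
theorem link_transfer {p : PySem.Dict Int Int} {ra rb : Int}
    (hra : p.getD ra ra = ra) (hrb : p.getD rb rb = rb) (hne : ra ≠ rb) :
    ∀ {m : Nat} {y s : Int}, RootedN p m y s →
      RootedN (p.insert rb ra) (if s = rb then m + 1 else m) y (if s = rb then ra else s) := by
  intro m y s h
  set p' := p.insert rb ra with hp'
  have hget : ∀ z, p'.getD z z = if z = rb then ra else p.getD z z := by
    intro z; rw [hp', PySem.Dict.getD_insert]
  have hraRoot : RootedN p' 0 ra ra :=
    RootedN.self ra (by rw [hget, if_neg hne]; exact hra)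
  induction h with
  | self y hy =>
    by_cases hyrb : y = rb
    · rw [hyrb, if_pos rfl, if_pos rfl]
      exact RootedN.step 0 rb ra (by rw [hget, if_pos rfl]; exact hne) (by rw [hget, if_pos rfl]; exact hraRoot)
    · simp only [if_neg hyrb]
      exact RootedN.self y (by rw [hget, if_neg hyrb]; exact hy)
  | step k y s hy hc ih =>
    have hyrb : y ≠ rb := fun he => hy (he ▸ hrb)
    by_cases hsrb : s = rb
    · simp only [if_pos hsrb] at ih ⊢
      exact RootedN.step (k + 1) y ra (by rw [hget, if_neg hyrb]; exact hy) (by rw [hget, if_neg hyrb]; exact ih)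
    · simp only [if_neg hsrb] at ih ⊢
      exact RootedN.step k y s (by rw [hget, if_neg hyrb]; exact hy) (by rw [hget, if_neg hyrb]; exact ih)


-- ---- find/union specifications ----

def UF (p : PySem.Dict Int Int) : Prop :=
  p.keys.Nodup ∧ (∀ z ∈ p.keys, p.getD z z ∈ p.keys) ∧ (∀ y, ∃ r, Rooted p y r)

theorem rooted_of_not_mem {p : PySem.Dict Int Int} {x : Int} (h : x ∉ p.keys) :
    RootedN p 0 x x := by
  refine RootedN.self x ?_
  by_contra hne
  exact h (notKey_getD hne)

/-- `pvFind` returns the chain's root, keeps the keys, keeps value-closure,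
    and preserves every node's root. -/
theorem pvFind_spec :
    ∀ (fuel : Nat) (p : PySem.Dict Int Int) (x : Int) (n : Nat) (r : Int),
      (∀ z ∈ p.keys, p.getD z z ∈ p.keys) → RootedN p n x r → n < fuel →
      (pvFind fuel p x).2 = r ∧ (pvFind fuel p x).1.keys = p.keys ∧
      (∀ z ∈ p.keys, (pvFind fuel p x).1.getD z z ∈ p.keys) ∧
      (∀ y s, Rooted p y s → Rooted (pvFind fuel p x).1 y s) := by
  intro fuel
  induction fuel with
  | zero => intro p x n r _ _ h; omega
  | succ f ih =>
    intro p x n r hcl h hfuel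
    by_cases hroot : p.getD x x = x
    · have : pvFind (f + 1) p x = (p, x) := by
        simp [pvFind, hroot]
      rw [this]
      have hr : r = x := by
        cases h with
        | self => rfl
        | step n x r h hc => exact absurd hroot h
      exact ⟨hr.symm, rfl, hcl, fun y s hs => hs⟩
    · have hxkeys : x ∈ p.keys := notKey_getD hroot
      have hstep : pvFind (f + 1) p x =
          pvFind f (p.insert x (p.getD (p.getD x x) (p.getD x x))) (p.getD (p.getD x x) (p.getD x x)) := by
        simp [pvFind, hroot]
      have hget : ∀ z, (p.insert x (p.getD (p.getD x x) (p.getD x x))).getD z z =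
          if z = x then p.getD (p.getD x x) (p.getD x x) else p.getD z z := by
        intro z; rw [PySem.Dict.getD_insert]
      have hkeys' : (p.insert x (p.getD (p.getD x x) (p.getD x x))).keys = p.keys :=
        PySem.Dict.keys_insert_of_contains p _ ((PySem.Dict.contains_iff_mem_keys p x).mpr hxkeys)
      have hcl' : ∀ z ∈ (p.insert x (p.getD (p.getD x x) (p.getD x x))).keys,
          (p.insert x (p.getD (p.getD x x) (p.getD x x))).getD z z ∈
          (p.insert x (p.getD (p.getD x x) (p.getD x x))).keys := by
        intro z hz
        rw [hkeys'] at hz ⊢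
        rw [hget]
        by_cases hzx : z = x
        · rw [if_pos hzx]
          exact hcl _ (hcl _ hxkeys)
        · rw [if_neg hzx]
          exact hcl _ hz
      -- a chain for the grandparent in the compressed dict, shorter than f
      have hgp : ∃ m' < f, RootedN (p.insert x (p.getD (p.getD x x) (p.getD x x))) m'
          (p.getD (p.getD x x) (p.getD x x)) r := by
        cases h with
        | self _ hxx => exact absurd hxx hroot
        | step k _ _ h hc =>
          cases hc with
          | self _ hroot2 =>
            -- grandparent = p.getD x x = r, a root; and it is not x
            rw [hroot2]
            refine ⟨0, by omega, RootedN.self _ ?_⟩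
            rw [PySem.Dict.getD_insert, if_neg hroot]
            exact hroot2
          | step j _ _ hne2 hc2 =>
            obtain ⟨m'', hle, h''⟩ := compress_transfer hroot _ _ _ hc2
            exact ⟨m'', by omega, h''⟩
      obtain ⟨m', hm', hchain⟩ := hgp
      have := ih (p.insert x (p.getD (p.getD x x) (p.getD x x))) _ m' r
        (by rw [hkeys'] at hcl' ⊢; exact hcl') hchain hm'
      obtain ⟨h1, h2, h3, h4⟩ := this
      rw [hstep]
      refine ⟨h1, by rw [h2, hkeys'], ?_, ?_⟩
      · rw [hkeys'] at h3; exact h3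
      · intro y s hs
        obtain ⟨my, hy⟩ := hs
        obtain ⟨my', _, hy'⟩ := compress_transfer hroot _ _ _ hy
        exact h4 y s ⟨my', hy'⟩

noncomputable def rt (p : PySem.Dict Int Int) (x : Int) : Int :=
  @dite Int (∃ r, Rooted p x r) (Classical.propDecidable _) (fun h => h.choose) (fun _ => x)

theorem rt_rooted {p : PySem.Dict Int Int} (hp : ∀ y, ∃ r, Rooted p y r) (x : Int) :
    Rooted p x (rt p x) := by
  unfold rt
  rw [dif_pos (hp x)]
  exact (hp x).choose_spec

theorem rooted_iff_rt {p : PySem.Dict Int Int} (hp : ∀ y, ∃ r, Rooted p y r) {x r : Int} :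
    Rooted p x r ↔ rt p x = r := by
  constructor
  · intro h; exact rooted_unique (rt_rooted hp x) h
  · intro h; exact h ▸ rt_rooted hp x

def SameRoot (p : PySem.Dict Int Int) (x y : Int) : Prop :=
  ∃ r, Rooted p x r ∧ Rooted p y r

theorem rooted_root {p : PySem.Dict Int Int} {n : Nat} {x r : Int}
    (h : RootedN p n x r) : p.getD r r = r := by
  induction h with
  | self x hx => exact hx
  | step n x r h hc ih => exact ih

theorem rt_mem {p : PySem.Dict Int Int} (hcl : ∀ z ∈ p.keys, p.getD z z ∈ p.keys)
    (hp : ∀ y, ∃ r, Rooted p y r) {x : Int} (hx : x ∈ p.keys) : rt p x ∈ p.keys := by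
  obtain ⟨n, hn⟩ := rt_rooted hp x
  exact rooted_mem hcl hx hn

theorem rt_root {p : PySem.Dict Int Int} (hp : ∀ y, ∃ r, Rooted p y r) (x : Int) :
    p.getD (rt p x) (rt p x) = rt p x := by
  obtain ⟨n, hn⟩ := rt_rooted hp x
  exact rooted_root hn

theorem rt_of_root {p : PySem.Dict Int Int} (hp : ∀ y, ∃ r, Rooted p y r) {x : Int}
    (h : p.getD x x = x) : rt p x = x :=
  ((rooted_iff_rt hp).mp ⟨0, RootedN.self x h⟩)

theorem ext_rooted {p p' : PySem.Dict Int Int} (hext : ∀ z, p'.getD z z = p.getD z z) :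
    ∀ y s, Rooted p y s ↔ Rooted p' y s := by
  intro y s
  constructor
  · rintro ⟨n, hn⟩; exact ⟨n, rootedN_ext hext hn⟩
  · rintro ⟨n, hn⟩; exact ⟨n, rootedN_ext (fun z => (hext z).symm) hn⟩

theorem ext_total {p p' : PySem.Dict Int Int} (hext : ∀ z, p'.getD z z = p.getD z z)
    (hp : ∀ y, ∃ r, Rooted p y r) : ∀ y, ∃ r, Rooted p' y r := by
  intro y
  obtain ⟨r, hr⟩ := hp y
  exact ⟨r, (ext_rooted hext y r).mp hr⟩

theorem ext_rt {p p' : PySem.Dict Int Int} (hext : ∀ z, p'.getD z z = p.getD z z)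
    (hp : ∀ y, ∃ r, Rooted p y r) : ∀ y, rt p' y = rt p y := by
  intro y
  exact (rooted_iff_rt (ext_total hext hp)).mp ((ext_rooted hext y _).mp (rt_rooted hp y))

theorem fresh_insert_ext {p : PySem.Dict Int Int} {a : Int} (ha : a ∉ p.keys) :
    ∀ z, (p.insert a a).getD z z = p.getD z z := by
  intro z
  rw [PySem.Dict.getD_insert]
  by_cases hz : z = a
  · subst hz
    rw [if_pos rfl]
    refine (PySem.Dict.getD_of_not_contains p z ?_).symm
    cases hcv : p.contains z with
    | false => rfl
    | true => exact absurd ((PySem.Dict.contains_iff_mem_keys p z).mp hcv) ha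
  · rw [if_neg hz]

theorem fresh_insert_UF {p : PySem.Dict Int Int} {a : Int} (hUF : UF p) (ha : a ∉ p.keys) :
    UF (p.insert a a) := by
  obtain ⟨hnd, hcl, htot⟩ := hUF
  have hkeys : (p.insert a a).keys = p.keys ++ [a] :=
    PySem.Dict.keys_insert_of_not_contains p a (by
      cases hcv : p.contains a with
      | false => rfl
      | true => exact absurd ((PySem.Dict.contains_iff_mem_keys p a).mp hcv) ha)
  refine ⟨?_, ?_, ext_total (fresh_insert_ext ha) htot⟩
  · rw [hkeys]
    refine List.Nodup.append hnd (List.nodup_singleton a) ?_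
    simpa using ha
  · intro z hz
    rw [hkeys] at hz ⊢
    rw [fresh_insert_ext ha]
    rcases List.mem_append.mp hz with hz | hz
    · exact List.mem_append.mpr (Or.inl (hcl z hz))
    · have : z = a := by simpa using hz
      subst this
      have : p.getD z z = z := PySem.Dict.getD_of_not_contains p z (by
        cases hcv : p.contains z with
        | false => rfl
        | true => exact absurd ((PySem.Dict.contains_iff_mem_keys p z).mp hcv) ha)
      rw [this]
      exact List.mem_append.mpr (Or.inr (by simp))

theorem keys_length_eq_size (p : PySem.Dict Int Int) : p.keys.length = p.size := by
  simp [PySem.Dict.size, PySem.Dict.keys]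

/-- the full `find` wrapper as A's code calls it. -/
theorem pvFind_full {p : PySem.Dict Int Int} (hUF : UF p) (x : Int) :
    (pvFind (p.size + 1) p x).2 = rt p x ∧
    (pvFind (p.size + 1) p x).1.keys = p.keys ∧
    UF (pvFind (p.size + 1) p x).1 ∧
    (∀ y, rt (pvFind (p.size + 1) p x).1 y = rt p y) := by
  obtain ⟨hnd, hcl, htot⟩ := hUF
  obtain ⟨n, hn⟩ := rt_rooted htot x
  have hbound : n < p.size + 1 := by
    have := rootedN_le hn
    rw [keys_length_eq_size] at this
    omega
  obtain ⟨h1, h2, h3, h4⟩ := pvFind_spec (p.size + 1) p x n (rt p x) hcl hn hbound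
  have htot' : ∀ y, ∃ r, Rooted (pvFind (p.size + 1) p x).1 y r := by
    intro y
    obtain ⟨r, hr⟩ := htot y
    exact ⟨r, h4 y r hr⟩
  refine ⟨h1, h2, ⟨by rw [h2]; exact hnd, by rw [h2]; exact h3, htot'⟩, ?_⟩
  intro y
  exact (rooted_iff_rt htot').mp (h4 y _ (rt_rooted htot y))

/-- linking root `rb` under root `ra`. -/
theorem link_full {p : PySem.Dict Int Int} {ra rb : Int} (hUF : UF p)
    (hra : p.getD ra ra = ra) (hrb : p.getD rb rb = rb)
    (hrak : ra ∈ p.keys) (hrbk : rb ∈ p.keys) (hne : ra ≠ rb) :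
    (p.insert rb ra).keys = p.keys ∧ UF (p.insert rb ra) ∧
    (∀ y, rt (p.insert rb ra) y = if rt p y = rb then ra else rt p y) := by
  obtain ⟨hnd, hcl, htot⟩ := hUF
  have hkeys : (p.insert rb ra).keys = p.keys :=
    PySem.Dict.keys_insert_of_contains p ra ((PySem.Dict.contains_iff_mem_keys p rb).mpr hrbk)
  have htrans : ∀ y, Rooted (p.insert rb ra) y (if rt p y = rb then ra else rt p y) := by
    intro y
    obtain ⟨n, hn⟩ := rt_rooted htot y
    have := link_transfer hra hrb hne hn
    by_cases hy : rt p y = rb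
    · rw [if_pos hy] at this ⊢
      exact ⟨n + 1, by rwa [if_pos hy] at this⟩
    · rw [if_neg hy] at this ⊢
      exact ⟨n, by rwa [if_neg hy] at this⟩
  have htot' : ∀ y, ∃ r, Rooted (p.insert rb ra) y r := fun y => ⟨_, htrans y⟩
  refine ⟨hkeys, ⟨by rw [hkeys]; exact hnd, ?_, htot'⟩, ?_⟩
  · intro z hz
    rw [hkeys] at hz ⊢
    rw [PySem.Dict.getD_insert]
    by_cases hzrb : z = rb
    · rw [if_pos hzrb]; exact hrak
    · rw [if_neg hzrb]; exact hcl z hz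
  · intro y
    exact (rooted_iff_rt htot').mp (htrans y)

/-- the full effect of A's `union(a, b)` on roots, orientation-free. -/
theorem pvUnion_full {parent size : PySem.Dict Int Int} {a b : Int} (hUF : UF parent)
    (ha : a ∈ parent.keys) (hb : b ∈ parent.keys) :
    (pvUnion parent size a b).1.keys = parent.keys ∧ UF (pvUnion parent size a b).1 ∧
    ∃ R, (R = rt parent a ∨ R = rt parent b) ∧
      (∀ y, ((rt parent y = rt parent a ∨ rt parent y = rt parent b) →
               rt (pvUnion parent size a b).1 y = R) ∧
            (rt parent y ≠ rt parent a → rt parent y ≠ rt parent b →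
               rt (pvUnion parent size a b).1 y = rt parent y)) := by
  obtain ⟨hf1, hf2, hf3, hf4⟩ := pvFind_full hUF a
  set p1 := (pvFind (parent.size + 1) parent a).1 with hp1
  obtain ⟨hg1, hg2, hg3, hg4⟩ := pvFind_full hf3 b
  set p2 := (pvFind (p1.size + 1) p1 b).1 with hp2
  have hra : (pvFind (parent.size + 1) parent a).2 = rt parent a := hf1
  have hrb : (pvFind (p1.size + 1) p1 b).2 = rt p1 b := hg1
  have hrb' : rt p1 b = rt parent b := hf4 b
  have hrt2 : ∀ y, rt p2 y = rt parent y := fun y => (hg4 y).trans (hf4 y)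
  have hkeys2 : p2.keys = parent.keys := hg2.trans hf2
  by_cases heq : rt parent a = rt parent b
  · -- no merge
    have hcase : pvUnion parent size a b = (p2, size) := by
      rw [pvUnion]
      simp [← hp1, ← hp2, hra, hrb, hrb', heq]
    rw [hcase]
    refine ⟨hkeys2, hg3, rt parent a, Or.inl rfl, ?_⟩
    intro y
    refine ⟨fun hy => ?_, fun _ _ => hrt2 y⟩
    rw [hrt2 y]
    rcases hy with hy | hy
    · exact hy
    · rw [hy, heq]
  · -- merge: insert pr.2 ↦ pr.1 with {pr.1, pr.2} = {rt a, rt b}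
    obtain ⟨hnd2, hcl2, htot2⟩ := id hg3
    have hraroot : p2.getD (rt parent a) (rt parent a) = rt parent a := by
      have := rt_root htot2 a
      rwa [hrt2 a] at this
    have hrbroot : p2.getD (rt parent b) (rt parent b) = rt parent b := by
      have := rt_root htot2 b
      rwa [hrt2 b] at this
    have hramem : rt parent a ∈ p2.keys := by
      rw [← hrt2 a]
      exact rt_mem hcl2 htot2 (by rw [hkeys2]; exact ha)
    have hrbmem : rt parent b ∈ p2.keys := by
      rw [← hrt2 b]
      exact rt_mem hcl2 htot2 (by rw [hkeys2]; exact hb)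
    by_cases hsz : size.getD (rt parent a) 0 < size.getD (rt parent b) 0
    · -- pr = (rt b, rt a) : insert (rt a) ↦ (rt b)
      have hcase : (pvUnion parent size a b).1 = p2.insert (rt parent a) (rt parent b) := by
        rw [pvUnion]
        simp only [← hp1, ← hp2, hra, hrb, hrb', if_neg heq, if_pos hsz]
      obtain ⟨hl1, hl2, hl3⟩ := link_full hg3 hrbroot hraroot hrbmem hramem (Ne.symm heq)
      rw [hcase]
      refine ⟨hl1.trans hkeys2, hl2, rt parent b, Or.inr rfl, ?_⟩
      intro y
      constructor
      · intro hy
        rw [hl3 y, hrt2 y]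
        rcases hy with hy | hy
        · rw [if_pos hy]
        · rw [hy]
          rw [if_neg (Ne.symm heq)]
      · intro hy1 hy2
        rw [hl3 y, hrt2 y, if_neg hy1]
    · -- pr = (rt a, rt b) : insert (rt b) ↦ (rt a)
      have hcase : (pvUnion parent size a b).1 = p2.insert (rt parent b) (rt parent a) := by
        rw [pvUnion]
        simp only [← hp1, ← hp2, hra, hrb, hrb', if_neg heq, if_neg hsz]
      obtain ⟨hl1, hl2, hl3⟩ := link_full hg3 hraroot hrbroot hramem hrbmem heq
      rw [hcase]
      refine ⟨hl1.trans hkeys2, hl2, rt parent a, Or.inl rfl, ?_⟩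
      intro y
      constructor
      · intro hy
        rw [hl3 y, hrt2 y]
        rcases hy with hy | hy
        · rw [hy]
          rw [if_neg heq]
        · rw [if_pos hy]
      · intro hy1 hy2
        rw [hl3 y, hrt2 y, if_neg hy2]

-- ---- B's relabelling dict ----

theorem get?_mk_map (F : Int → Int) :
    ∀ (l : List (Int × Int)) (k : Int),
      (PySem.Dict.mk (l.map (fun q => (q.1, F q.2)))).get? k =
        ((PySem.Dict.mk l).get? k).map F := by
  intro l
  induction l with
  | nil => intro k; rfl
  | cons q rest ih =>
    intro k
    obtain ⟨k0, v0⟩ := q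
    simp only [List.map_cons, PySem.Dict.get?_mk_cons]
    by_cases hk : (k0 == k) = true
    · rw [if_pos hk, if_pos hk]; rfl
    · rw [if_neg hk, if_neg hk]; exact ih k

theorem keys_mk_map (F : Int → Int) (l : List (Int × Int)) :
    (PySem.Dict.mk (l.map (fun q => (q.1, F q.2)))).keys = (PySem.Dict.mk l).keys := by
  simp [PySem.Dict.keys, List.map_map, Function.comp]

theorem relabel_fun (la lb : Int) :
    (fun p : Int × Int => if p.2 = lb then (p.1, la) else p) =
    (fun q : Int × Int => (q.1, if q.2 = lb then la else q.2)) := by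
  funext p
  by_cases h : p.2 = lb
  · simp [h]
  · simp [h]

theorem contains_false_iff (d : PySem.Dict Int Int) (k : Int) :
    d.contains k = false ↔ k ∉ d.keys := by
  constructor
  · intro h hk
    rw [(PySem.Dict.contains_iff_mem_keys d k).mpr hk] at h
    cases h
  · intro hk
    cases hcv : d.contains k with
    | false => rfl
    | true => exact absurd ((PySem.Dict.contains_iff_mem_keys d k).mp hcv) hk

-- ---- the joint invariant between A's and B's loop states ----

def StInv (parent label : PySem.Dict Int Int) (next : Int) : Prop :=
  parent.keys = label.keys ∧ UF parent ∧
  (∀ x ∈ label.keys, label.getD x 0 < next) ∧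
  (∀ x ∈ parent.keys, ∀ y ∈ parent.keys,
     (rt parent x = rt parent y ↔ label.getD x 0 = label.getD y 0))

theorem pvStep_inv (parent size label : PySem.Dict Int Int) (next : Int) (e : List Int)
    (h : StInv parent label next) :
    StInv (pvStep (parent, size) e).1 (pvRelabelStep (label, next) e).1
        (pvRelabelStep (label, next) e).2 := by
  obtain ⟨hkeys, hUF, hbnd, hrel⟩ := h
  rcases e with _ | ⟨a, _ | ⟨b, _ | ⟨c, tl⟩⟩⟩
  · exact ⟨hkeys, hUF, hbnd, hrel⟩
  · exact ⟨hkeys, hUF, hbnd, hrel⟩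
  case cons.cons.nil =>
    obtain ⟨hnd, hcl, htot⟩ := id hUF
    have hmem : ∀ z, z ∈ parent.keys ↔ ¬ label.get? z = none := by
      intro z; rw [hkeys]
      constructor
      · intro hz hn; exact (PySem.Dict.get?_eq_none_iff_not_mem_keys label z).mp hn hz
      · intro hz; by_contra hzz
        exact hz ((PySem.Dict.get?_eq_none_iff_not_mem_keys label z).mpr hzz)
    cases hga : label.get? a with
    | none =>
      have ha : a ∉ parent.keys := fun hx => ((hmem a).mp hx) hga
      have hca : parent.contains a = false := (contains_false_iff _ _).mpr ha
      have hla : a ∉ label.keys := by rw [← hkeys]; exact ha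
      have hcla : label.contains a = false := (contains_false_iff _ _).mpr hla
      cases hgb : label.get? b with
      | none =>
        -- both new
        have hb : b ∉ parent.keys := fun hx => ((hmem b).mp hx) hgb
        have hlb : b ∉ label.keys := by rw [← hkeys]; exact hb
        have hUF1 : UF (parent.insert a a) := fresh_insert_UF hUF ha
        have hkeys1 : (parent.insert a a).keys = parent.keys ++ [a] :=
          PySem.Dict.keys_insert_of_not_contains parent a hca
        have hrta : rt (parent.insert a a) a = a :=
          rt_of_root hUF1.2.2 (by rw [PySem.Dict.getD_insert, if_pos rfl])
        have hrt1 : ∀ y, rt (parent.insert a a) y = rt parent y :=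
          ext_rt (fresh_insert_ext ha) htot
        by_cases hab : a = b
        · -- a = b
          subst hab
          have hAstep : pvStep (parent, size) [a, a] =
              pvUnion (parent.insert a a) (size.insert a 1) a a := by
            simp [pvStep, hca, PySem.Dict.contains_insert_self]
          have hBstep : pvRelabelStep (label, next) [a, a] =
              (label.insert a next, next + 1) := by
            simp [pvRelabelStep, hga, PySem.Dict.insert_insert_self]
          rw [hAstep, hBstep]
          obtain ⟨hu1, hu2, R, hR, hcol⟩ :=
            pvUnion_full (size := size.insert a 1) hUF1
              (show a ∈ (parent.insert a a).keys by
                rw [hkeys1]; exact List.mem_append.mpr (Or.inr (by simp)))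
              (show a ∈ (parent.insert a a).keys by
                rw [hkeys1]; exact List.mem_append.mpr (Or.inr (by simp)))
          have hRa : R = a := by rcases hR with h | h <;> rw [h, hrta]
          have hrtU : ∀ y, rt (pvUnion (parent.insert a a) (size.insert a 1) a a).1 y =
              rt (parent.insert a a) y := by
            intro y
            by_cases hy : rt (parent.insert a a) y = a
            · rw [(hcol y).1 (Or.inl (by rw [hrta, hy])), hRa, hy]
            · exact (hcol y).2 (by rwa [hrta]) (by rwa [hrta])
          have hlkeys : (label.insert a next).keys = label.keys ++ [a] :=
            PySem.Dict.keys_insert_of_not_contains label next hcla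
          refine ⟨?_, hu2, ?_, ?_⟩
          · rw [hu1, hkeys1, hlkeys, hkeys]
          · intro x hx
            rw [hlkeys] at hx
            rw [PySem.Dict.getD_insert]
            rcases List.mem_append.mp hx with hx | hx
            · rw [if_neg (show ¬ x = a by intro he; rw [he] at hx; exact hla hx)]
              have := hbnd x hx; omega
            · have hxa : x = a := by simpa using hx
              rw [if_pos hxa]; omega
          · intro x hx y hy
            rw [hu1, hkeys1] at hx hy
            rw [hrtU, hrtU, PySem.Dict.getD_insert, PySem.Dict.getD_insert]
            rcases List.mem_append.mp hx with hx | hx <;>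
              rcases List.mem_append.mp hy with hy | hy
            · rw [hrt1, hrt1, if_neg (show ¬ x = a by intro he; rw [he] at hx; exact ha hx),
                if_neg (show ¬ y = a by intro he; rw [he] at hy; exact ha hy)]
              exact hrel x hx y hy
            · have hya : y = a := by simpa using hy
              rw [hya, hrt1, hrta, if_neg (show ¬ x = a by intro he; rw [he] at hx; exact ha hx),
                if_pos rfl]
              constructor
              · intro he; exact absurd (he ▸ rt_mem hcl htot hx) ha
              · intro he; have := hbnd x (by rw [← hkeys]; exact hx); omega
            · have hxa : x = a := by simpa using hx
              rw [hxa, hrta, hrt1, if_pos rfl,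
                if_neg (show ¬ y = a by intro he; rw [he] at hy; exact ha hy)]
              constructor
              · intro he; exact absurd (he.symm ▸ rt_mem hcl htot hy) ha
              · intro he; have := hbnd y (by rw [← hkeys]; exact hy); omega
            · have hxa : x = a := by simpa using hx
              have hya : y = a := by simpa using hy
              rw [hxa, hya]
              simp
        · -- a ≠ b
          have hb2 : b ∉ (parent.insert a a).keys := by
            rw [hkeys1]
            intro hmem2
            rcases List.mem_append.mp hmem2 with h | h
            · exact hb h
            · exact hab (List.mem_singleton.mp h).symm
          have hUF2 : UF ((parent.insert a a).insert b b) := fresh_insert_UF hUF1 hb2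
          have hkeys2 : ((parent.insert a a).insert b b).keys = parent.keys ++ [a] ++ [b] := by
            rw [PySem.Dict.keys_insert_of_not_contains _ b ((contains_false_iff _ _).mpr hb2), hkeys1]
          have hrt2 : ∀ y, rt ((parent.insert a a).insert b b) y = rt (parent.insert a a) y :=
            ext_rt (fresh_insert_ext hb2) hUF1.2.2
          have hrta2 : rt ((parent.insert a a).insert b b) a = a := (hrt2 a).trans hrta
          have hrtb2 : rt ((parent.insert a a).insert b b) b = b :=
            rt_of_root hUF2.2.2 (by rw [PySem.Dict.getD_insert, if_pos rfl])
          have hAstep : pvStep (parent, size) [a, b] =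
              pvUnion ((parent.insert a a).insert b b) ((size.insert a 1).insert b 1) a b := by
            have hcb1 : (parent.insert a a).contains b = false := (contains_false_iff _ _).mpr hb2
            simp [pvStep, hca, hcb1]
          have hBstep : pvRelabelStep (label, next) [a, b] =
              ((label.insert a next).insert b next, next + 1) := by
            simp [pvRelabelStep, hga, hgb]
          rw [hAstep, hBstep]
          obtain ⟨hu1, hu2, R, hR, hcol⟩ :=
            pvUnion_full (size := (size.insert a 1).insert b 1) hUF2
              (show a ∈ ((parent.insert a a).insert b b).keys by
                rw [hkeys2]; simp)
              (show b ∈ ((parent.insert a a).insert b b).keys by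
                rw [hkeys2]; simp)
          have hRnot : R ∉ parent.keys := by
            rcases hR with h | h
            · rw [h, hrta2]; exact ha
            · rw [h, hrtb2]; exact hb
          have hUold : ∀ z ∈ parent.keys,
              rt (pvUnion ((parent.insert a a).insert b b) ((size.insert a 1).insert b 1) a b).1 z
                = rt parent z := by
            intro z hz
            have hzp : rt ((parent.insert a a).insert b b) z = rt parent z :=
              (hrt2 z).trans (hrt1 z)
            have hzmem : rt parent z ∈ parent.keys := rt_mem hcl htot hz
            have hz1 : rt ((parent.insert a a).insert b b) z ≠ rt ((parent.insert a a).insert b b) a := by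
              rw [hzp, hrta2]; intro he; exact ha (he ▸ hzmem)
            have hz2 : rt ((parent.insert a a).insert b b) z ≠ rt ((parent.insert a a).insert b b) b := by
              rw [hzp, hrtb2]; intro he; exact hb (he ▸ hzmem)
            rw [(hcol z).2 hz1 hz2, hzp]
          have hUa : rt (pvUnion ((parent.insert a a).insert b b) ((size.insert a 1).insert b 1) a b).1 a = R :=
            (hcol a).1 (Or.inl rfl)
          have hUb : rt (pvUnion ((parent.insert a a).insert b b) ((size.insert a 1).insert b 1) a b).1 b = R :=
            (hcol b).1 (Or.inr rfl)
          have hLkeys : ((label.insert a next).insert b next).keys = label.keys ++ [a] ++ [b] := by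
            have hclb1 : (label.insert a next).contains b = false := by
              refine (contains_false_iff _ _).mpr ?_
              rw [PySem.Dict.keys_insert_of_not_contains label next hcla]
              intro hmem2
              rcases List.mem_append.mp hmem2 with h | h
              · exact hlb h
              · exact hab (List.mem_singleton.mp h).symm
            rw [PySem.Dict.keys_insert_of_not_contains _ next hclb1,
              PySem.Dict.keys_insert_of_not_contains label next hcla]
          have hL : ∀ z, ((label.insert a next).insert b next).getD z 0 =
              if z = b then next else if z = a then next else label.getD z 0 := by
            intro z
            rw [PySem.Dict.getD_insert, PySem.Dict.getD_insert]
          refine ⟨?_, hu2, ?_, ?_⟩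
          · rw [hu1, hkeys2, hLkeys, hkeys]
          · intro x hx
            rw [hLkeys] at hx
            rw [hL]
            rcases List.mem_append.mp hx with hx | hx
            · rcases List.mem_append.mp hx with hx | hx
              · rw [if_neg (show ¬ x = b by intro he; rw [he] at hx; exact hlb hx),
                  if_neg (show ¬ x = a by intro he; rw [he] at hx; exact hla hx)]
                have := hbnd x hx; omega
              · have hxa' : x = a := List.mem_singleton.mp hx
                rw [if_neg (show ¬ x = b by rw [hxa']; exact hab), if_pos hxa']
                omega
            · rw [if_pos (List.mem_singleton.mp hx)]; omega
          · intro x hx y hy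
            rw [hu1, hkeys2] at hx hy
            rw [hL, hL]
            rcases List.mem_append.mp hx with hx | hx <;>
              rcases List.mem_append.mp hy with hy | hy
            · -- x, y ∈ keys ++ [a]
              rcases List.mem_append.mp hx with hx | hx <;>
                rcases List.mem_append.mp hy with hy | hy
              · have hxp : ¬ x = b := by intro he; rw [he] at hx; exact hb hx
                have hxa' : ¬ x = a := by intro he; rw [he] at hx; exact ha hx
                have hyp : ¬ y = b := by intro he; rw [he] at hy; exact hb hy
                have hya' : ¬ y = a := by intro he; rw [he] at hy; exact ha hy
                rw [hUold x hx, hUold y hy, if_neg hxp, if_neg hxa', if_neg hyp, if_neg hya']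
                exact hrel x hx y hy
              · have hya' : y = a := List.mem_singleton.mp hy
                have hxp : ¬ x = b := by intro he; rw [he] at hx; exact hb hx
                have hxa' : ¬ x = a := by intro he; rw [he] at hx; exact ha hx
                rw [hya', hUold x hx, hUa, if_neg hxp, if_neg hxa',
                  if_neg (show ¬ a = b from hab), if_pos rfl]
                constructor
                · intro he; exact absurd (he ▸ rt_mem hcl htot hx) hRnot
                · intro he; have := hbnd x (by rw [← hkeys]; exact hx); omega
              · have hxa' : x = a := List.mem_singleton.mp hx
                have hyp : ¬ y = b := by intro he; rw [he] at hy; exact hb hy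
                have hya' : ¬ y = a := by intro he; rw [he] at hy; exact ha hy
                rw [hxa', hUold y hy, hUa, if_neg (show ¬ a = b from hab), if_pos rfl,
                  if_neg hyp, if_neg hya']
                constructor
                · intro he; exact absurd (he.symm ▸ rt_mem hcl htot hy) hRnot
                · intro he; have := hbnd y (by rw [← hkeys]; exact hy); omega
              · have hxa' : x = a := List.mem_singleton.mp hx
                have hya' : y = a := List.mem_singleton.mp hy
                rw [hxa', hya']
                simp
            · -- x ∈ keys ++ [a], y = b
              have hyb : y = b := List.mem_singleton.mp hy
              rcases List.mem_append.mp hx with hx | hx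
              · have hxp : ¬ x = b := by intro he; rw [he] at hx; exact hb hx
                have hxa' : ¬ x = a := by intro he; rw [he] at hx; exact ha hx
                rw [hyb, hUold x hx, hUb, if_neg hxp, if_neg hxa', if_pos rfl]
                constructor
                · intro he; exact absurd (he ▸ rt_mem hcl htot hx) hRnot
                · intro he; have := hbnd x (by rw [← hkeys]; exact hx); omega
              · have hxa' : x = a := List.mem_singleton.mp hx
                rw [hyb, hxa', hUa, hUb, if_pos rfl,
                  if_neg (show ¬ a = b from hab), if_pos rfl]
                simp
            · -- x = b, y ∈ keys ++ [a]
              have hxb : x = b := List.mem_singleton.mp hx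
              rcases List.mem_append.mp hy with hy | hy
              · have hyp : ¬ y = b := by intro he; rw [he] at hy; exact hb hy
                have hya' : ¬ y = a := by intro he; rw [he] at hy; exact ha hy
                rw [hxb, hUold y hy, hUb, if_pos rfl, if_neg hyp, if_neg hya']
                constructor
                · intro he; exact absurd (he.symm ▸ rt_mem hcl htot hy) hRnot
                · intro he; have := hbnd y (by rw [← hkeys]; exact hy); omega
              · have hya' : y = a := List.mem_singleton.mp hy
                rw [hxb, hya', hUa, hUb, if_pos rfl,
                  if_neg (show ¬ a = b from hab), if_pos rfl]
                simp
            · -- x = b, y = b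
              have hxb : x = b := List.mem_singleton.mp hx
              have hyb : y = b := List.mem_singleton.mp hy
              rw [hxb, hyb]
              simp
      | some lb =>
        -- a new, b existing
        have hb : b ∈ parent.keys := (hmem b).mpr (by rw [hgb]; simp)
        have hlbval : label.getD b 0 = lb := PySem.Dict.getD_of_get?_eq_some label 0 hgb
        have hUF1 : UF (parent.insert a a) := fresh_insert_UF hUF ha
        have hkeys1 : (parent.insert a a).keys = parent.keys ++ [a] :=
          PySem.Dict.keys_insert_of_not_contains parent a hca
        have hrta : rt (parent.insert a a) a = a :=
          rt_of_root hUF1.2.2 (by rw [PySem.Dict.getD_insert, if_pos rfl])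
        have hrt1 : ∀ y, rt (parent.insert a a) y = rt parent y :=
          ext_rt (fresh_insert_ext ha) htot
        have hbmem1 : b ∈ (parent.insert a a).keys := by
          rw [hkeys1]; exact List.mem_append.mpr (Or.inl hb)
        have hamem1 : a ∈ (parent.insert a a).keys := by
          rw [hkeys1]; simp
        have hAstep : pvStep (parent, size) [a, b] =
            pvUnion (parent.insert a a) (size.insert a 1) a b := by
          simp [pvStep, hca, (PySem.Dict.contains_iff_mem_keys _ b).mpr hbmem1]
        have hBstep : pvRelabelStep (label, next) [a, b] = (label.insert a lb, next) := by
          simp [pvRelabelStep, hga, hgb]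
        rw [hAstep, hBstep]
        obtain ⟨hu1, hu2, R, hR, hcol⟩ :=
          pvUnion_full (size := size.insert a 1) hUF1 hamem1 hbmem1
        have hrtb1 : rt (parent.insert a a) b = rt parent b := hrt1 b
        have hrtbmem : rt parent b ∈ parent.keys := rt_mem hcl htot hb
        have hRcases : R = a ∨ R = rt parent b := by
          rcases hR with h | h
          · left; rw [h, hrta]
          · right; rw [h, hrtb1]
        have hUold : ∀ z ∈ parent.keys,
            rt (pvUnion (parent.insert a a) (size.insert a 1) a b).1 z =
              if rt parent z = rt parent b then R else rt parent z := by
          intro z hz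
          have hz1 : rt (parent.insert a a) z = rt parent z := hrt1 z
          by_cases hc : rt parent z = rt parent b
          · rw [if_pos hc]
            exact (hcol z).1 (Or.inr (by rw [hz1, hrtb1, hc]))
          · rw [if_neg hc]
            have hn1 : rt (parent.insert a a) z ≠ rt (parent.insert a a) a := by
              rw [hz1, hrta]
              intro he; exact ha (he ▸ rt_mem hcl htot hz)
            have hn2 : rt (parent.insert a a) z ≠ rt (parent.insert a a) b := by
              rw [hz1, hrtb1]; exact hc
            rw [(hcol z).2 hn1 hn2, hz1]
        have hUa : rt (pvUnion (parent.insert a a) (size.insert a 1) a b).1 a = R :=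
          (hcol a).1 (Or.inl rfl)
        have hL : ∀ z, (label.insert a lb).getD z 0 = if z = a then lb else label.getD z 0 := by
          intro z; rw [PySem.Dict.getD_insert]
        have hLkeys : (label.insert a lb).keys = label.keys ++ [a] :=
          PySem.Dict.keys_insert_of_not_contains label lb hcla
        have hbl : b ∈ label.keys := by rw [← hkeys]; exact hb
        refine ⟨?_, hu2, ?_, ?_⟩
        · rw [hu1, hkeys1, hLkeys, hkeys]
        · intro x hx
          rw [hLkeys] at hx
          rw [hL]
          rcases List.mem_append.mp hx with hx | hx
          · rw [if_neg (show ¬ x = a by intro he; rw [he] at hx; exact hla hx)]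
            exact hbnd x hx
          · rw [if_pos (List.mem_singleton.mp hx), ← hlbval]
            exact hbnd b hbl
        · intro x hx y hy
          rw [hu1, hkeys1] at hx hy
          rw [hL, hL]
          rcases List.mem_append.mp hx with hx | hx <;>
            rcases List.mem_append.mp hy with hy | hy
          · -- old-old
            have hxa' : ¬ x = a := by intro he; rw [he] at hx; exact ha hx
            have hya' : ¬ y = a := by intro he; rw [he] at hy; exact ha hy
            rw [hUold x hx, hUold y hy, if_neg hxa', if_neg hya']
            by_cases hcx : rt parent x = rt parent b <;>
              by_cases hcy : rt parent y = rt parent b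
            · rw [if_pos hcx, if_pos hcy]
              exact iff_of_true rfl ((hrel x hx y hy).mp (hcx.trans hcy.symm))
            · rw [if_pos hcx, if_neg hcy]
              refine iff_of_false ?_ ?_
              · intro he
                rcases hRcases with h | h
                · rw [h] at he; exact ha (he ▸ rt_mem hcl htot hy)
                · rw [h] at he; exact hcy he.symm
              · intro hl
                have := (hrel x hx y hy).mpr hl
                exact hcy (this.symm.trans hcx)
            · rw [if_neg hcx, if_pos hcy]
              refine iff_of_false ?_ ?_
              · intro he
                rcases hRcases with h | h
                · rw [h] at he; exact ha (he.symm ▸ rt_mem hcl htot hx)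
                · rw [h] at he; exact hcx he
              · intro hl
                have := (hrel x hx y hy).mpr hl
                exact hcx (this.trans hcy)
            · rw [if_neg hcx, if_neg hcy]
              exact hrel x hx y hy
          · -- old x, y = a
            have hya' : y = a := List.mem_singleton.mp hy
            have hxa' : ¬ x = a := by intro he; rw [he] at hx; exact ha hx
            rw [hya', hUa, hUold x hx, if_neg hxa', if_pos rfl]
            by_cases hcx : rt parent x = rt parent b
            · rw [if_pos hcx]
              refine iff_of_true rfl ?_
              have := (hrel x hx b hb).mp hcx
              rw [hlbval] at this
              exact this
            · rw [if_neg hcx]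
              refine iff_of_false ?_ ?_
              · intro he
                rcases hRcases with h | h
                · rw [h] at he; exact ha (he ▸ rt_mem hcl htot hx)
                · rw [h] at he; exact hcx he
              · intro hl
                rw [← hlbval] at hl
                exact hcx ((hrel x hx b hb).mpr hl)
          · -- x = a, old y
            have hxa' : x = a := List.mem_singleton.mp hx
            have hya' : ¬ y = a := by intro he; rw [he] at hy; exact ha hy
            rw [hxa', hUa, hUold y hy, if_pos rfl, if_neg hya']
            by_cases hcy : rt parent y = rt parent b
            · rw [if_pos hcy]
              refine iff_of_true rfl ?_
              have := (hrel y hy b hb).mp hcy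
              rw [hlbval] at this
              exact this.symm
            · rw [if_neg hcy]
              refine iff_of_false ?_ ?_
              · intro he
                rcases hRcases with h | h
                · rw [h] at he; exact ha (he.symm ▸ rt_mem hcl htot hy)
                · rw [h] at he; exact hcy he.symm
              · intro hl
                rw [← hlbval] at hl
                exact hcy ((hrel y hy b hb).mpr hl.symm)
          · have hxa' : x = a := List.mem_singleton.mp hx
            have hya' : y = a := List.mem_singleton.mp hy
            rw [hxa', hya']
            simp
    | some la =>
      cases hgb : label.get? b with
      | none =>
        -- a existing, b new
        have ha : a ∈ parent.keys := (hmem a).mpr (by rw [hga]; simp)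
        have hlaval : label.getD a 0 = la := PySem.Dict.getD_of_get?_eq_some label 0 hga
        have hb : b ∉ parent.keys := fun hx => ((hmem b).mp hx) hgb
        have hcb : parent.contains b = false := (contains_false_iff _ _).mpr hb
        have hlb : b ∉ label.keys := by rw [← hkeys]; exact hb
        have hclb : label.contains b = false := (contains_false_iff _ _).mpr hlb
        have hUF1 : UF (parent.insert b b) := fresh_insert_UF hUF hb
        have hkeys1 : (parent.insert b b).keys = parent.keys ++ [b] :=
          PySem.Dict.keys_insert_of_not_contains parent b hcb
        have hrtb : rt (parent.insert b b) b = b :=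
          rt_of_root hUF1.2.2 (by rw [PySem.Dict.getD_insert, if_pos rfl])
        have hrt1 : ∀ y, rt (parent.insert b b) y = rt parent y :=
          ext_rt (fresh_insert_ext hb) htot
        have hamem1 : a ∈ (parent.insert b b).keys := by
          rw [hkeys1]; exact List.mem_append.mpr (Or.inl ha)
        have hbmem1 : b ∈ (parent.insert b b).keys := by
          rw [hkeys1]; simp
        have hAstep : pvStep (parent, size) [a, b] =
            pvUnion (parent.insert b b) (size.insert b 1) a b := by
          simp [pvStep, (PySem.Dict.contains_iff_mem_keys parent a).mpr ha, hcb]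
        have hBstep : pvRelabelStep (label, next) [a, b] = (label.insert b la, next) := by
          simp [pvRelabelStep, hga, hgb]
        rw [hAstep, hBstep]
        obtain ⟨hu1, hu2, R, hR, hcol⟩ :=
          pvUnion_full (size := size.insert b 1) hUF1 hamem1 hbmem1
        have hrta1 : rt (parent.insert b b) a = rt parent a := hrt1 a
        have hrtamem : rt parent a ∈ parent.keys := rt_mem hcl htot ha
        have hRcases : R = rt parent a ∨ R = b := by
          rcases hR with h | h
          · left; rw [h, hrta1]
          · right; rw [h, hrtb]
        have hUold : ∀ z ∈ parent.keys,
            rt (pvUnion (parent.insert b b) (size.insert b 1) a b).1 z =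
              if rt parent z = rt parent a then R else rt parent z := by
          intro z hz
          have hz1 : rt (parent.insert b b) z = rt parent z := hrt1 z
          by_cases hc : rt parent z = rt parent a
          · rw [if_pos hc]
            exact (hcol z).1 (Or.inl (by rw [hz1, hrta1, hc]))
          · rw [if_neg hc]
            have hn1 : rt (parent.insert b b) z ≠ rt (parent.insert b b) a := by
              rw [hz1, hrta1]; exact hc
            have hn2 : rt (parent.insert b b) z ≠ rt (parent.insert b b) b := by
              rw [hz1, hrtb]
              intro he; exact hb (he ▸ rt_mem hcl htot hz)
            rw [(hcol z).2 hn1 hn2, hz1]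
        have hUb : rt (pvUnion (parent.insert b b) (size.insert b 1) a b).1 b = R :=
          (hcol b).1 (Or.inr rfl)
        have hL : ∀ z, (label.insert b la).getD z 0 = if z = b then la else label.getD z 0 := by
          intro z; rw [PySem.Dict.getD_insert]
        have hLkeys : (label.insert b la).keys = label.keys ++ [b] :=
          PySem.Dict.keys_insert_of_not_contains label la hclb
        have hal : a ∈ label.keys := by rw [← hkeys]; exact ha
        refine ⟨?_, hu2, ?_, ?_⟩
        · rw [hu1, hkeys1, hLkeys, hkeys]
        · intro x hx
          rw [hLkeys] at hx
          rw [hL]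
          rcases List.mem_append.mp hx with hx | hx
          · rw [if_neg (show ¬ x = b by intro he; rw [he] at hx; exact hlb hx)]
            exact hbnd x hx
          · rw [if_pos (List.mem_singleton.mp hx), ← hlaval]
            exact hbnd a hal
        · intro x hx y hy
          rw [hu1, hkeys1] at hx hy
          rw [hL, hL]
          rcases List.mem_append.mp hx with hx | hx <;>
            rcases List.mem_append.mp hy with hy | hy
          · -- old-old
            have hxb' : ¬ x = b := by intro he; rw [he] at hx; exact hb hx
            have hyb' : ¬ y = b := by intro he; rw [he] at hy; exact hb hy
            rw [hUold x hx, hUold y hy, if_neg hxb', if_neg hyb']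
            by_cases hcx : rt parent x = rt parent a <;>
              by_cases hcy : rt parent y = rt parent a
            · rw [if_pos hcx, if_pos hcy]
              exact iff_of_true rfl ((hrel x hx y hy).mp (hcx.trans hcy.symm))
            · rw [if_pos hcx, if_neg hcy]
              refine iff_of_false ?_ ?_
              · intro he
                rcases hRcases with h | h
                · rw [h] at he; exact hcy he.symm
                · rw [h] at he; exact hb (he ▸ rt_mem hcl htot hy)
              · intro hl
                have := (hrel x hx y hy).mpr hl
                exact hcy (this.symm.trans hcx)
            · rw [if_neg hcx, if_pos hcy]
              refine iff_of_false ?_ ?_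
              · intro he
                rcases hRcases with h | h
                · rw [h] at he; exact hcx he
                · rw [h] at he; exact hb (he.symm ▸ rt_mem hcl htot hx)
              · intro hl
                have := (hrel x hx y hy).mpr hl
                exact hcx (this.trans hcy)
            · rw [if_neg hcx, if_neg hcy]
              exact hrel x hx y hy
          · -- old x, y = b
            have hyb' : y = b := List.mem_singleton.mp hy
            have hxb' : ¬ x = b := by intro he; rw [he] at hx; exact hb hx
            rw [hyb', hUb, hUold x hx, if_neg hxb', if_pos rfl]
            by_cases hcx : rt parent x = rt parent a
            · rw [if_pos hcx]
              refine iff_of_true rfl ?_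
              have := (hrel x hx a ha).mp hcx
              rw [hlaval] at this
              exact this
            · rw [if_neg hcx]
              refine iff_of_false ?_ ?_
              · intro he
                rcases hRcases with h | h
                · rw [h] at he; exact hcx he
                · rw [h] at he; exact hb (he ▸ rt_mem hcl htot hx)
              · intro hl
                rw [← hlaval] at hl
                exact hcx ((hrel x hx a ha).mpr hl)
          · -- x = b, old y
            have hxb' : x = b := List.mem_singleton.mp hx
            have hyb' : ¬ y = b := by intro he; rw [he] at hy; exact hb hy
            rw [hxb', hUb, hUold y hy, if_pos rfl, if_neg hyb']
            by_cases hcy : rt parent y = rt parent a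
            · rw [if_pos hcy]
              refine iff_of_true rfl ?_
              have := (hrel y hy a ha).mp hcy
              rw [hlaval] at this
              exact this.symm
            · rw [if_neg hcy]
              refine iff_of_false ?_ ?_
              · intro he
                rcases hRcases with h | h
                · rw [h] at he; exact hcy he.symm
                · rw [h] at he; exact hb (he.symm ▸ rt_mem hcl htot hy)
              · intro hl
                rw [← hlaval] at hl
                exact hcy ((hrel y hy a ha).mpr hl.symm)
          · have hxb' : x = b := List.mem_singleton.mp hx
            have hyb' : y = b := List.mem_singleton.mp hy
            rw [hxb', hyb']
            simp
      | some lb =>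
        -- both existing
        have ha : a ∈ parent.keys := (hmem a).mpr (by rw [hga]; simp)
        have hb : b ∈ parent.keys := (hmem b).mpr (by rw [hgb]; simp)
        have hlaval : label.getD a 0 = la := PySem.Dict.getD_of_get?_eq_some label 0 hga
        have hlbval : label.getD b 0 = lb := PySem.Dict.getD_of_get?_eq_some label 0 hgb
        have hal : a ∈ label.keys := by rw [← hkeys]; exact ha
        have hbl : b ∈ label.keys := by rw [← hkeys]; exact hb
        have hAstep : pvStep (parent, size) [a, b] = pvUnion parent size a b := by
          simp [pvStep, (PySem.Dict.contains_iff_mem_keys parent a).mpr ha,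
            (PySem.Dict.contains_iff_mem_keys parent b).mpr hb]
        obtain ⟨hu1, hu2, R, hR, hcol⟩ := pvUnion_full (size := size) hUF ha hb
        by_cases hll : la = lb
        · -- already same class: neither side changes the partition
          have hBstep : pvRelabelStep (label, next) [a, b] = (label, next) := by
            simp [pvRelabelStep, hga, hgb, hll]
          rw [hAstep, hBstep]
          have hrab : rt parent a = rt parent b :=
            (hrel a ha b hb).mpr (by rw [hlaval, hlbval, hll])
          have hUeq : ∀ z, rt (pvUnion parent size a b).1 z = rt parent z := by
            intro z
            by_cases hc : rt parent z = rt parent a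
            · have hRa : R = rt parent a := by
                rcases hR with h | h
                · exact h
                · rw [h, ← hrab]
              rw [(hcol z).1 (Or.inl hc), hRa, hc]
            · exact (hcol z).2 hc (by rw [← hrab]; exact hc)
          refine ⟨by rw [hu1, hkeys], hu2, hbnd, ?_⟩
          intro x hx y hy
          rw [hu1] at hx hy
          rw [hUeq, hUeq]
          exact hrel x hx y hy
        · -- distinct classes: A links the roots, B relabels lb to la
          have hBstep : pvRelabelStep (label, next) [a, b] =
              (PySem.Dict.mk (label.items.map (fun p => if p.2 = lb then (p.1, la) else p)),
                next) := by
            simp [pvRelabelStep, hga, hgb, hll]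
          rw [hAstep, hBstep]
          have hrab : ¬ rt parent a = rt parent b := fun he =>
            hll (by rw [← hlaval, ← hlbval]; exact (hrel a ha b hb).mp he)
          have heta : PySem.Dict.mk label.items = label := rfl
          have hLget : ∀ k,
              (PySem.Dict.mk (label.items.map (fun p => if p.2 = lb then (p.1, la) else p))).get? k =
                (label.get? k).map (fun v => if v = lb then la else v) := by
            intro k
            rw [relabel_fun la lb, get?_mk_map (fun v => if v = lb then la else v) label.items k, heta]
          have hLkeys :
              (PySem.Dict.mk (label.items.map (fun p => if p.2 = lb then (p.1, la) else p))).keys =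
                label.keys := by
            rw [relabel_fun la lb, keys_mk_map (fun v => if v = lb then la else v) label.items, heta]
          have hLgetD : ∀ z ∈ label.keys,
              (PySem.Dict.mk (label.items.map (fun p => if p.2 = lb then (p.1, la) else p))).getD z 0 =
                if label.getD z 0 = lb then la else label.getD z 0 := by
            intro z hz
            cases hgz : label.get? z with
            | none => exact absurd ((PySem.Dict.get?_eq_none_iff_not_mem_keys label z).mp hgz) (by simpa using hz)
            | some v =>
              have h1 := hLget z
              rw [hgz] at h1
              rw [PySem.Dict.getD_of_get?_eq_some _ 0 h1,
                PySem.Dict.getD_of_get?_eq_some _ 0 hgz]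
          refine ⟨by rw [hu1, hkeys, hLkeys], hu2, ?_, ?_⟩
          · intro x hx
            rw [hLkeys] at hx
            rw [hLgetD x hx]
            by_cases hc : label.getD x 0 = lb
            · rw [if_pos hc, ← hlaval]
              exact hbnd a hal
            · rw [if_neg hc]
              exact hbnd x hx
          · intro x hx y hy
            rw [hu1] at hx hy
            have hxl : x ∈ label.keys := by rw [← hkeys]; exact hx
            have hyl : y ∈ label.keys := by rw [← hkeys]; exact hy
            rw [hLgetD x hxl, hLgetD y hyl]
            have hxa : rt parent x = rt parent a ↔ label.getD x 0 = la := by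
              rw [← hlaval]; exact hrel x hx a ha
            have hxb : rt parent x = rt parent b ↔ label.getD x 0 = lb := by
              rw [← hlbval]; exact hrel x hx b hb
            have hya : rt parent y = rt parent a ↔ label.getD y 0 = la := by
              rw [← hlaval]; exact hrel y hy a ha
            have hyb : rt parent y = rt parent b ↔ label.getD y 0 = lb := by
              rw [← hlbval]; exact hrel y hy b hb
            by_cases hcx : rt parent x = rt parent a ∨ rt parent x = rt parent b <;>
              by_cases hcy : rt parent y = rt parent a ∨ rt parent y = rt parent b
            · -- both in the merged zone
              rw [(hcol x).1 hcx, (hcol y).1 hcy]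
              refine iff_of_true rfl ?_
              have hfx : (if label.getD x 0 = lb then la else label.getD x 0) = la := by
                rcases hcx with h | h
                · rw [hxa] at h
                  rw [h]
                  by_cases hdl : la = lb
                  · rw [if_pos hdl]
                  · rw [if_neg hdl]
                · rw [hxb] at h
                  rw [if_pos h]
              have hfy : (if label.getD y 0 = lb then la else label.getD y 0) = la := by
                rcases hcy with h | h
                · rw [hya] at h
                  rw [h]
                  by_cases hdl : la = lb
                  · rw [if_pos hdl]
                  · rw [if_neg hdl]
                · rw [hyb] at h
                  rw [if_pos h]
              rw [hfx, hfy]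
            · -- x merged, y untouched
              push Not at hcy
              rw [(hcol x).1 hcx, (hcol y).2 hcy.1 hcy.2]
              have hylb : ¬ label.getD y 0 = lb := fun h => hcy.2 (hyb.mpr h)
              have hyla : ¬ label.getD y 0 = la := fun h => hcy.1 (hya.mpr h)
              refine iff_of_false ?_ ?_
              · intro he
                rcases hR with h | h
                · rw [h] at he; exact hcy.1 he.symm
                · rw [h] at he; exact hcy.2 he.symm
              · intro hl
                rw [if_neg hylb] at hl
                have hfx : (if label.getD x 0 = lb then la else label.getD x 0) = la := by
                  rcases hcx with h | h
                  · rw [hxa] at h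
                    rw [h]
                    by_cases hdl : la = lb
                    · rw [if_pos hdl]
                    · rw [if_neg hdl]
                  · rw [hxb] at h
                    rw [if_pos h]
                rw [hfx] at hl
                exact hyla hl.symm
            · -- y merged, x untouched
              push Not at hcx
              rw [(hcol y).1 hcy, (hcol x).2 hcx.1 hcx.2]
              have hxlb : ¬ label.getD x 0 = lb := fun h => hcx.2 (hxb.mpr h)
              have hxla : ¬ label.getD x 0 = la := fun h => hcx.1 (hxa.mpr h)
              refine iff_of_false ?_ ?_
              · intro he
                rcases hR with h | h
                · rw [h] at he; exact hcx.1 he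
                · rw [h] at he; exact hcx.2 he
              · intro hl
                rw [if_neg hxlb] at hl
                have hfy : (if label.getD y 0 = lb then la else label.getD y 0) = la := by
                  rcases hcy with h | h
                  · rw [hya] at h
                    rw [h]
                    by_cases hdl : la = lb
                    · rw [if_pos hdl]
                    · rw [if_neg hdl]
                  · rw [hyb] at h
                    rw [if_pos h]
                rw [hfy] at hl
                exact hxla hl
            · -- neither touched
              push Not at hcx
              push Not at hcy
              rw [(hcol x).2 hcx.1 hcx.2, (hcol y).2 hcy.1 hcy.2]
              have hxlb : ¬ label.getD x 0 = lb := fun h => hcx.2 (hxb.mpr h)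
              have hylb : ¬ label.getD y 0 = lb := fun h => hcy.2 (hyb.mpr h)
              rw [if_neg hxlb, if_neg hylb]
              exact hrel x hx y hy
  · exact ⟨hkeys, hUF, hbnd, hrel⟩

-- ---- carrying the invariant through the edge loop ----

theorem fold_inv : ∀ (es : List (List Int)) (parent size label : PySem.Dict Int Int) (next : Int),
    StInv parent label next →
    StInv (es.foldl pvStep (parent, size)).1 (es.foldl pvRelabelStep (label, next)).1
      (es.foldl pvRelabelStep (label, next)).2 := by
  intro es
  induction es with
  | nil => exact fun _ _ _ _ h => h
  | cons e tl ih =>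
    intro parent size label next h
    simp only [List.foldl_cons]
    have h1 := pvStep_inv parent size label next e h
    have h2 := ih (pvStep (parent, size) e).1 (pvStep (parent, size) e).2
      (pvRelabelStep (label, next) e).1 (pvRelabelStep (label, next) e).2 h1
    exact h2

theorem init_inv : StInv PySem.Dict.empty PySem.Dict.empty 0 := by
  refine ⟨by simp [pysem], ⟨by simp [pysem], by simp [pysem], ?_⟩, by simp [pysem], by simp [pysem]⟩
  intro y
  refine ⟨y, 0, rooted_of_not_mem ?_⟩
  simp [pysem]

-- ---- the final grouping loops ----

/-- A's final loop: threading the compressing `find` is the same as grouping by the root. -/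
theorem finalA : ∀ (ks : List Int) (p : PySem.Dict Int Int) (p0 : PySem.Dict Int Int)
    (c : PySem.Dict Int (List Int)),
    UF p → (∀ y, rt p y = rt p0 y) →
    (ks.foldl
      (fun (q : PySem.Dict Int Int × PySem.Dict Int (List Int)) node =>
        let fr := pvFind (q.1.size + 1) q.1 node
        (fr.1, q.2.insert fr.2 (q.2.getD fr.2 [] ++ [node])))
      (p, c)).2 =
    ks.foldl (fun c node => c.insert (rt p0 node) (c.getD (rt p0 node) [] ++ [node])) c := by
  intro ks
  induction ks with
  | nil => intro p p0 c _ _; rfl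
  | cons node tl ih =>
    intro p p0 c hUF hrt
    simp only [List.foldl_cons]
    obtain ⟨h1, h2, h3, h4⟩ := pvFind_full hUF node
    rw [ih (pvFind (p.size + 1) p node).1 p0 _ h3 (fun y => (h4 y).trans (hrt y)), h1, hrt node]

/-- the grouping fold's lookups. -/
theorem groupfold_getD (f : Int → Int) :
    ∀ (u : List Int) (d : PySem.Dict Int (List Int)) (c : Int),
      (u.foldl (fun d x => d.insert (f x) (d.getD (f x) [] ++ [x])) d).getD c [] =
        d.getD c [] ++ u.filter (fun x => f x == c) := by
  intro u
  induction u with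
  | nil => intro d c; simp
  | cons x v ih =>
    intro d c
    simp only [List.foldl_cons, List.filter_cons]
    rw [ih]
    by_cases hc : f x == c
    · have hc' : c = f x := (beq_iff_eq.mp hc).symm
      rw [hc, PySem.Dict.getD_insert, if_pos hc']
      subst hc'
      simp
    · rw [Bool.not_eq_true] at hc
      rw [hc, PySem.Dict.getD_insert,
        if_neg (fun he : c = f x => by rw [he, beq_self_eq_true] at hc; cases hc)]
      simp

theorem groupfold_values (f : Int → Int) (u : List Int) :
    (u.foldl (fun d x => d.insert (f x) (d.getD (f x) [] ++ [x])) PySem.Dict.empty).values =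
      (PySem.Set.ofList (u.map f)).map (fun k => u.filter (fun x => f x == k)) := by
  have hkeys : (u.foldl (fun d x => d.insert (f x) (d.getD (f x) [] ++ [x]))
      (PySem.Dict.empty : PySem.Dict Int (List Int))).keys = PySem.Set.ofList (u.map f) := by
    rw [PySem.Dict.keys_foldl_insert_key u f
      (fun d x => d.getD (f x) [] ++ [x]) PySem.Dict.empty]
    rfl
  have hnd : (u.foldl (fun d x => d.insert (f x) (d.getD (f x) [] ++ [x]))
      (PySem.Dict.empty : PySem.Dict Int (List Int))).keys.Nodup := by
    refine PySem.Dict.nodup_keys_foldl_insert_key u f _ PySem.Dict.empty ?_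
    simp [pysem]
  rw [PySem.Dict.values_eq_map_keys _ hnd [], hkeys]
  refine List.map_congr_left ?_
  intro k _
  rw [groupfold_getD]
  simp [pysem]

/-- ordered dedup commutes with filtering. -/
theorem ofList_filter : ∀ (l : List Int) (p : Int → Bool),
    (PySem.Set.ofList l).filter p = PySem.Set.ofList (l.filter p) := by
  intro l
  induction l with
  | nil => intro p; rfl
  | cons z l ih =>
    intro p
    have hdis : ∀ (s : List Int) (a : Int), PySem.Set.discard s a = s.filter (fun w => !(w == a)) :=
      fun s a => rfl
    by_cases hp : p z = true
    · calc (PySem.Set.ofList (z :: l)).filter p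
          = (z :: (PySem.Set.ofList l).discard z).filter p := by rw [PySem.Set.ofList_cons]
        _ = z :: ((PySem.Set.ofList l).filter (fun w => !(w == z))).filter p := by
            rw [List.filter_cons, if_pos hp, hdis]
        _ = z :: ((PySem.Set.ofList (l.filter p)).filter (fun w => !(w == z))) := by
            rw [List.filter_filter, ← ih p, List.filter_filter]
            congr 1
            exact List.filter_congr (fun a _ => Bool.and_comm _ _)
        _ = z :: (PySem.Set.ofList (l.filter p)).discard z := by rw [hdis]
        _ = PySem.Set.ofList (z :: l.filter p) := (PySem.Set.ofList_cons z (l.filter p)).symm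
        _ = PySem.Set.ofList ((z :: l).filter p) := by rw [List.filter_cons, if_pos hp]
    · have hp' : p z = false := by rwa [Bool.not_eq_true] at hp
      calc (PySem.Set.ofList (z :: l)).filter p
          = (z :: (PySem.Set.ofList l).discard z).filter p := by rw [PySem.Set.ofList_cons]
        _ = ((PySem.Set.ofList l).filter (fun w => !(w == z))).filter p := by
            rw [List.filter_cons, hdis]
            simp [hp']
        _ = (PySem.Set.ofList l).filter p := by
            rw [List.filter_filter]
            refine List.filter_congr ?_
            intro a _
            by_cases haz : a = z
            · simp [haz, hp']
            · simp [haz]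
        _ = PySem.Set.ofList (l.filter p) := ih p
        _ = PySem.Set.ofList ((z :: l).filter p) := by rw [List.filter_cons]; simp [hp']

/-- peel one component off the grouped-values expression. -/
theorem setmap_decomp (f : Int → Int) (x : Int) (v : List Int) :
    (PySem.Set.ofList ((x :: v).map f)).map (fun k => (x :: v).filter (fun z => f z == k)) =
      (x :: v.filter (fun z => f z == f x)) ::
      (PySem.Set.ofList ((v.filter (fun y => !(f y == f x))).map f)).map
        (fun k => (v.filter (fun y => !(f y == f x))).filter (fun z => f z == k)) := by
  have hdis : ∀ (s : List Int) (a : Int), PySem.Set.discard s a = s.filter (fun w => !(w == a)) :=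
    fun s a => rfl
  have hof : PySem.Set.ofList ((x :: v).map f) =
      f x :: PySem.Set.ofList ((v.filter (fun y => !(f y == f x))).map f) := by
    rw [List.map_cons, PySem.Set.ofList_cons, hdis, ofList_filter, List.filter_map]
    rfl
  rw [hof, List.map_cons]
  congr 1
  · rw [List.filter_cons]
    simp
  · refine List.map_congr_left ?_
    intro k hk
    have hk' : k ∈ (v.filter (fun y => !(f y == f x))).map f := by
      rw [PySem.Set.mem_ofList] at hk
      exact hk
    obtain ⟨w, hw, rfl⟩ := List.mem_map.mp hk'
    have hw' := List.mem_filter.mp hw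
    have hwx : (f w == f x) = false := by
      have := hw'.2
      rwa [Bool.not_eq_eq_eq_not, Bool.not_true] at this
    have hxk : (f x == f w) = false := by
      rw [beq_eq_false_iff_ne] at hwx ⊢
      exact fun he => hwx he.symm
    rw [List.filter_cons, hxk]
    simp only [Bool.false_eq_true, if_false]
    rw [List.filter_filter]
    refine (List.filter_congr ?_).symm
    intro y _
    by_cases hyk : (f y == f w) = true
    · have : (f y == f x) = false := by
        rw [beq_eq_false_iff_ne] at hwx ⊢
        rw [beq_iff_eq] at hyk
        exact fun he => hwx (hyk.symm.trans he)
      rw [hyk, this]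
      rfl
    · rw [Bool.not_eq_true] at hyk
      rw [hyk]
      rfl

/-- two key functions inducing the same partition group a list identically. -/
theorem setmap_congr : ∀ (n : Nat) (u : List Int) (f g : Int → Int), u.length ≤ n →
    (∀ x ∈ u, ∀ y ∈ u, f x = f y ↔ g x = g y) →
    (PySem.Set.ofList (u.map f)).map (fun k => u.filter (fun z => f z == k)) =
      (PySem.Set.ofList (u.map g)).map (fun k => u.filter (fun z => g z == k)) := by
  intro n
  induction n with
  | zero =>
    intro u f g hlen _
    rw [List.eq_nil_of_length_eq_zero (Nat.le_zero.mp hlen)]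
    rfl
  | succ n ih =>
    intro u f g hlen hfg
    match u with
    | [] => rfl
    | x :: v =>
      have hbeq : ∀ y ∈ v, (f y == f x) = (g y == g x) := by
        intro y hy
        by_cases h : f y = f x
        · rw [beq_iff_eq.mpr h,
            beq_iff_eq.mpr ((hfg y (List.mem_cons_of_mem x hy) x (List.mem_cons_self)).mp h)]
        · have h2 : ¬ g y = g x := fun hgg =>
            h ((hfg y (List.mem_cons_of_mem x hy) x (List.mem_cons_self)).mpr hgg)
          rw [beq_eq_false_iff_ne.mpr h, beq_eq_false_iff_ne.mpr h2]
      have hvx : v.filter (fun y => !(f y == f x)) = v.filter (fun y => !(g y == g x)) :=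
        List.filter_congr (fun y hy => by rw [hbeq y hy])
      rw [setmap_decomp f x v, setmap_decomp g x v]
      congr 1
      · congr 1
        exact List.filter_congr (fun y hy => hbeq y hy)
      · rw [← hvx]
        refine ih (v.filter (fun y => !(f y == f x))) f g ?_ ?_
        · have := List.length_filter_le (fun y => !(f y == f x)) v
          have hv : v.length ≤ n := by simpa using hlen
          omega
        · intro a ha b hb
          exact hfg a (List.mem_cons_of_mem x (List.mem_filter.mp ha).1)
            b (List.mem_cons_of_mem x (List.mem_filter.mp hb).1)

-- ===== VERDICT (by name: the statement is the Claim_ definition above) =====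
theorem get_disjoint_swap_sets_spec : Claim_equal_get_disjoint_swap_sets := by
  unfold Claim_equal_get_disjoint_swap_sets
  intro l _ _
  unfold Spec_get_disjoint_swap_sets
  by_cases hnil : l = []
  · subst hnil; rfl
  · simp only [get_disjoint_swap_sets, get_disjoint_swap_sets_alt, if_neg hnil]
    obtain ⟨hkeys, hUF, hbnd, hrel⟩ :=
      fold_inv l PySem.Dict.empty PySem.Dict.empty PySem.Dict.empty 0 init_inv
    rw [finalA (l.foldl pvStep (PySem.Dict.empty, PySem.Dict.empty)).1.keys
      (l.foldl pvStep (PySem.Dict.empty, PySem.Dict.empty)).1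
      (l.foldl pvStep (PySem.Dict.empty, PySem.Dict.empty)).1
      PySem.Dict.empty hUF (fun y => rfl)]
    have hnd2 : (l.foldl pvRelabelStep (PySem.Dict.empty, 0)).1.keys.Nodup := by
      rw [← hkeys]; exact hUF.1
    rw [PySem.Dict.items_eq_map_keys (l.foldl pvRelabelStep (PySem.Dict.empty, 0)).1 hnd2 0,
      List.foldl_map, ← hkeys]
    rw [groupfold_values (fun node => rt (l.foldl pvStep (PySem.Dict.empty, PySem.Dict.empty)).1 node)
      (l.foldl pvStep (PySem.Dict.empty, PySem.Dict.empty)).1.keys,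
      groupfold_values (fun k => (l.foldl pvRelabelStep (PySem.Dict.empty, 0)).1.getD k 0)
      (l.foldl pvStep (PySem.Dict.empty, PySem.Dict.empty)).1.keys]
    exact setmap_congr (l.foldl pvStep (PySem.Dict.empty, PySem.Dict.empty)).1.keys.length
      (l.foldl pvStep (PySem.Dict.empty, PySem.Dict.empty)).1.keys _ _ le_rfl hrel
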